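-- pv_equiv track=rewrite | github.com/chloeeekim/TIL | Algorithm/Programmers/Codes/77886.py | solution
-- ===== SOURCE A (Python) =====
-- def solution(s):
--     answer = []
--     for x in s:
--         stack = []
--         count_110 = 0
--         for num in x:
--             if len(stack) >= 2 and num == "0":
--                 if stack[-1] == "1" and stack[-2] == "1":
--                     count_110 += 1
--                     stack.pop()
--                     stack.pop()
--                     continue
--             stack.append(num)
--
--         insert_idx = "".join(stack).rfind("0")
--
--         ans = "".join(stack[:insert_idx+1]) + "110" * count_110 + "".join(stack[insert_idx+1:])
--         answer.append(ans)
--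
--     return answer
-- ===== SOURCE B (Python) =====
-- def solution(s):
--     answer = []
--     for x in s:
--         count = 0
--         while '110' in x:
--             x = x.replace('110', '', 1)
--             count += 1
--         idx = x.rfind('0')
--         answer.append(x[:idx+1] + '110' * count + x[idx+1:])
--     return answer
-- ===== Notes on version B (the rewrite author's own statement) =====
-- stated objective: simpler
-- what changed: Replaces the explicit stack simulation with a repeated leftmost '110'-deletion loop (the rewrite '110'->'' is overlap-free hence confluent, so residual and deletion count match the stack's), keeping the rfind-based reinsertion.
import Mathlib
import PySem

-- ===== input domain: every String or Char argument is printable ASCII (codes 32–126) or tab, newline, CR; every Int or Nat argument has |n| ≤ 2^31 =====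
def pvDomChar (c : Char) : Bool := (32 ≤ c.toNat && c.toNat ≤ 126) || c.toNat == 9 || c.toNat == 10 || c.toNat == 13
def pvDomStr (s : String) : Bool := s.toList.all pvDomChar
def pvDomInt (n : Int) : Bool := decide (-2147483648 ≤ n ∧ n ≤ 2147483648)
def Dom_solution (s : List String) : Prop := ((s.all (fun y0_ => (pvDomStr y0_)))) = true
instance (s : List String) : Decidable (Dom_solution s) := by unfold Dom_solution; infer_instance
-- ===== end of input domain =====

-- B replaces A's one-pass stack simulation with repeated leftmost '110' deletion
-- (the rewrite '110'→'' is overlap-free hence confluent); same rfind-based reinsertion.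

-- ===== PORT A =====
-- one step of A's inner loop: stack (forward, append at end) and count_110
def pvStepA (p : List Char × Int) (num : Char) : List Char × Int :=
  if p.1.length ≥ 2 ∧ num = '0' ∧ p.1.getLast? = some '1' ∧ p.1.dropLast.getLast? = some '1'
  then (p.1.dropLast.dropLast, p.2 + 1)
  else (p.1 ++ [num], p.2)

def solution (s : List String) : List String :=
  s.map (fun x =>
    let r := x.toList.foldl pvStepA ([], 0)
    let idx := PySem.Chars.rfind r.1 ['0']
    String.ofList (PySem.List.slice r.1 none (some (idx + 1)) ++
               PySem.List.pyRepeat ['1', '1', '0'] r.2 ++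
               PySem.List.slice r.1 (some (idx + 1)) none))

-- ===== PORT B =====
-- x.replace('110','',1) when '110' in x, none otherwise (leftmost removal; exact)
def pvRm110 : List Char → Option (List Char)
  | a :: b :: c :: t =>
      if a = '1' ∧ b = '1' ∧ c = '0' then some t
      else (pvRm110 (b :: c :: t)).map (a :: ·)
  | _ => none

theorem pvRm110_length : ∀ {l y : List Char}, pvRm110 l = some y → l.length = y.length + 3 := by
  intro l
  fun_induction pvRm110 l with
  | case1 a b c t h =>
      intro y hy; simp at hy; simp [← hy]
  | case2 a b c t h ih =>
      intro y hy
      simp at hy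
      obtain ⟨z, hz, rfl⟩ := hy
      have := ih hz; simp at this ⊢; omega
  | case3 l h => intro y hy; simp at hy

-- B's while loop: while '110' in x: x = x.replace('110','',1); count += 1
def pvReduce (l : List Char) : List Char × Int :=
  match h : pvRm110 l with
  | some y => ((pvReduce y).1, (pvReduce y).2 + 1)
  | none => (l, 0)
termination_by l.length
decreasing_by have := pvRm110_length h; omega

def solution_alt (s : List String) : List String :=
  s.map (fun x =>
    let p := pvReduce x.toList
    let idx := PySem.Chars.rfind p.1 ['0']
    String.ofList (PySem.List.slice p.1 none (some (idx + 1)) ++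
               PySem.List.pyRepeat ['1', '1', '0'] p.2 ++
               PySem.List.slice p.1 (some (idx + 1)) none))

-- ===== PRECONDITION & SPEC =====
def Spec_solution (s : List String) (out : List String) : Prop := out = solution_alt s
instance (s : List String) (out : List String) : Decidable (Spec_solution s out) := by unfold Spec_solution; infer_instance

-- ===== CLAIM (what is proved, stated in full; the proofs are below) =====
def Claim_equal_solution : Prop := ∀ (s : List String), Dom_solution s → Spec_solution s (solution s)

-- ===== LEMMAS AND PROOFS =====

-- removing the leftmost '110' commutes with appending on the right
theorem pvRm110_append_of_some : ∀ {p y : List Char}, pvRm110 p = some y →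
    ∀ q, pvRm110 (p ++ q) = some (y ++ q) := by
  intro p
  fun_induction pvRm110 p with
  | case1 a b c t h =>
      intro y hy q
      simp [pvRm110, h] at hy ⊢
      simp [← hy]
  | case2 a b c t h ih =>
      intro y hy q
      simp [pvRm110, h] at hy ⊢
      obtain ⟨z, hz, rfl⟩ := hy
      exact ⟨z ++ q, by simpa using ih hz q, by simp⟩
  | case3 l h => intro y hy; simp at hy

theorem pvRm110_prefix {p q : List Char} (h : pvRm110 (p ++ q) = none) : pvRm110 p = none := by
  cases hp : pvRm110 p with
  | none => rfl
  | some y => rw [pvRm110_append_of_some hp q] at h; cases h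

-- appending a char that does not complete a '110' keeps the string irreducible
theorem pvRm110_snoc_none : ∀ {p : List Char}, pvRm110 p = none →
    ∀ c : Char, ¬(c = '0' ∧ p.getLast? = some '1' ∧ p.dropLast.getLast? = some '1') →
    pvRm110 (p ++ [c]) = none := by
  intro p
  fun_induction pvRm110 p with
  | case1 a b c t h => intro hn; simp at hn
  | case2 a b c t h ih =>
      intro hn x hc
      simp [pvRm110, h] at hn ⊢
      have := ih hn x (by simpa using hc)
      simpa using this
  | case3 l h =>
      intro hn x hc
      match l with
      | [] => simp [pvRm110]
      | [a] => simp [pvRm110]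
      | [a, b] =>
          simp at hc
          simp [pvRm110]
          intro ha hb hx
          exact hc hx hb ha
      | a :: b :: c :: t => exact absurd rfl (h a b c t)

-- appending '0' to an irreducible string ending in "11" deletes exactly that "110"
theorem pvRm110_pop : ∀ {p : List Char}, pvRm110 p = none →
    p.getLast? = some '1' → p.dropLast.getLast? = some '1' →
    ∀ rest, pvRm110 (p ++ '0' :: rest) = some (p.dropLast.dropLast ++ rest) := by
  intro p
  fun_induction pvRm110 p with
  | case1 a b c t h => intro hn; simp at hn
  | case2 a b c t h ih =>
      intro hn h1 h2 rest
      simp [pvRm110, h] at hn ⊢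
      have := ih hn (by simpa using h1) (by simpa using h2) rest
      simpa using this
  | case3 l h =>
      intro hn h1 h2 rest
      match l with
      | [] => simp at h2
      | [a] => simp at h2
      | [a, b] =>
          simp at h1 h2
          subst h1 h2
          simp [pvRm110]
      | a :: b :: c :: t => exact absurd rfl (h a b c t)

theorem pvReduce_none {l : List Char} (h : pvRm110 l = none) : pvReduce l = (l, 0) := by
  rw [pvReduce]; split <;> simp_all

theorem pvReduce_some {l y : List Char} (h : pvRm110 l = some y) :
    pvReduce l = ((pvReduce y).1, (pvReduce y).2 + 1) := by
  rw [pvReduce]; split <;> simp_all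

theorem pvStepA_shift (st : List Char) (c : Int) (x : Char) :
    pvStepA (st, c) x = ((pvStepA (st, 0) x).1, (pvStepA (st, 0) x).2 + c) := by
  unfold pvStepA
  split_ifs <;> simp [Int.add_comm]

theorem foldA_shift : ∀ (rest : List Char) (st : List Char) (c : Int),
    List.foldl pvStepA (st, c) rest =
      ((List.foldl pvStepA (st, 0) rest).1, (List.foldl pvStepA (st, 0) rest).2 + c) := by
  intro rest
  induction rest with
  | nil => intro st c; simp
  | cons x rest ih =>
      intro st c
      simp only [List.foldl_cons]
      rw [pvStepA_shift st c x, ih _ ((pvStepA (st, 0) x).2 + c), ih _ (pvStepA (st, 0) x).2]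
      simp [add_assoc]

theorem len2_of_dropLast_getLast? {p : List Char} {a : Char}
    (h : p.dropLast.getLast? = some a) : 2 ≤ p.length := by
  match p with
  | [] => simp at h
  | [x] => simp at h
  | x :: y :: t => simp

-- main invariant: B's repeated-deletion loop on (irreducible prefix ++ rest)
-- computes exactly A's stack fold over rest
theorem pvKey : ∀ (rest st : List Char), pvRm110 st = none →
    pvReduce (st ++ rest) = List.foldl pvStepA (st, 0) rest := by
  intro rest
  induction rest with
  | nil => intro st hst; simp [pvReduce_none hst]
  | cons num rest ih =>
      intro st hst
      by_cases hc : num = '0' ∧ st.getLast? = some '1' ∧ st.dropLast.getLast? = some '1'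
      · obtain ⟨h0, h1, h2⟩ := hc
        subst h0
        have hne : st ≠ [] := by rintro rfl; simp at h1
        have e1 : st.dropLast ++ [st.getLast hne] = st := List.dropLast_append_getLast hne
        have hstd : pvRm110 st.dropLast = none := pvRm110_prefix (q := [st.getLast hne]) (by rw [e1]; exact hst)
        have hne2 : st.dropLast ≠ [] := by rintro h; rw [h] at h2; simp at h2
        have e2 : st.dropLast.dropLast ++ [st.dropLast.getLast hne2] = st.dropLast :=
          List.dropLast_append_getLast hne2
        have hst' : pvRm110 st.dropLast.dropLast = none :=
          pvRm110_prefix (q := [st.dropLast.getLast hne2]) (by rw [e2]; exact hstd)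
        rw [pvReduce_some (pvRm110_pop hst h1 h2 rest), ih _ hst']
        have hguard : pvStepA (st, (0:Int)) '0' = (st.dropLast.dropLast, 1) := by
          unfold pvStepA
          rw [if_pos ⟨len2_of_dropLast_getLast? h2, rfl, h1, h2⟩]
          simp
        simp only [List.foldl_cons, hguard]
        rw [foldA_shift rest st.dropLast.dropLast 1]
      · have hsnoc := pvRm110_snoc_none hst num hc
        have hguard : pvStepA (st, (0:Int)) num = (st ++ [num], 0) := by
          unfold pvStepA
          rw [if_neg]
          rintro ⟨_, h0, h1, h2⟩
          exact hc ⟨h0, h1, h2⟩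
        have e : st ++ num :: rest = (st ++ [num]) ++ rest := by simp
        rw [e, ih _ hsnoc]
        simp only [List.foldl_cons, hguard]

-- ===== VERDICT (by name: the statement is the Claim_ definition above) =====
theorem solution_spec : Claim_equal_solution := by
  unfold Claim_equal_solution Spec_solution solution solution_alt
  intro s _
  apply List.map_congr_left
  intro x _
  have h : pvReduce x.toList = List.foldl pvStepA ([], 0) x.toList := by
    simpa using pvKey x.toList [] rfl
  rw [h]
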